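-- pv_equiv track=rewrite | github.com/memphispants86/baby-name-picker | convert_uk_to_csv.py | likely_sheet_names
-- ===== SOURCE A (Python) =====
-- from typing import Dict, List, Optional, Tuple
--
-- SUSPECT_SHEET_KEYWORDS = [
--     "table 1",
--     "top 100",
--     "boys",
--     "e&w",
--     "england",
--     "wales",
-- ]
--
-- def normalize_string(value: object) -> str:
--     if value is None:
--         return ""
--     s = str(value)
--     return " ".join(s.replace("\n", " ").split()).strip()
--
-- def likely_sheet_names(sheet_names: List[str]) -> List[str]:
--     # Rank sheets by heuristic score using keywords
--     scored: List[Tuple[int, str]] = []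
--     for name in sheet_names:
--         norm = normalize_string(name).lower()
--         score = 0
--         for kw in SUSPECT_SHEET_KEYWORDS:
--             if kw in norm:
--                 score += 1
--         if name.lower().strip() in ["table_1", "table 1", "table1"]:
--             score += 3
--         scored.append((score, name))
--     # Highest score first; tie-breaker: keep order provided by Excel
--     scored.sort(key=lambda t: t[0], reverse=True)
--     ordered = [name for score, name in scored if score > 0]
--     # Fallback: original ordering if nothing matched
--     if not ordered:
--         return list(sheet_names)
--     return ordered
-- ===== SOURCE B (Python) =====
-- from typing import List
--
-- SUSPECT_SHEET_KEYWORDS = [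
--     "table 1",
--     "top 100",
--     "boys",
--     "e&w",
--     "england",
--     "wales",
-- ]
--
-- def normalize_string(value: object) -> str:
--     if value is None:
--         return ""
--     s = str(value)
--     return " ".join(s.replace("\n", " ").split()).strip()
--
-- def _score(name: str) -> int:
--     norm = normalize_string(name).lower()
--     score = sum(kw in norm for kw in SUSPECT_SHEET_KEYWORDS)
--     if name.lower().strip() in ("table_1", "table 1", "table1"):
--         score += 3
--     return score
--
-- def likely_sheet_names(sheet_names: List[str]) -> List[str]:
--     # Counting/bucket order instead of a sort: the score is bounded by 9
--     # (6 keywords + the table-1 bonus of 3), so emit each score bucket from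
--     # 9 down to 1 in original order; score 0 is skipped, and if nothing
--     # scored, fall back to the original ordering.
--     ordered: List[str] = []
--     for s in range(9, 0, -1):
--         ordered.extend(n for n in sheet_names if _score(n) == s)
--     return ordered if ordered else list(sheet_names)
-- ===== Notes on version B (the rewrite author's own statement) =====
-- stated objective: alternative
-- what changed: Replaces the build-score-tuples + stable reverse comparison sort with counting/bucket ordering: since a score is at most 9 (6 keywords + the table-1 bonus of 3), B emits the names whose score equals s for s = 9 down to 1, preserving original order inside each bucket, with the same original-order fallback when nothing scores.
import Mathlib
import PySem

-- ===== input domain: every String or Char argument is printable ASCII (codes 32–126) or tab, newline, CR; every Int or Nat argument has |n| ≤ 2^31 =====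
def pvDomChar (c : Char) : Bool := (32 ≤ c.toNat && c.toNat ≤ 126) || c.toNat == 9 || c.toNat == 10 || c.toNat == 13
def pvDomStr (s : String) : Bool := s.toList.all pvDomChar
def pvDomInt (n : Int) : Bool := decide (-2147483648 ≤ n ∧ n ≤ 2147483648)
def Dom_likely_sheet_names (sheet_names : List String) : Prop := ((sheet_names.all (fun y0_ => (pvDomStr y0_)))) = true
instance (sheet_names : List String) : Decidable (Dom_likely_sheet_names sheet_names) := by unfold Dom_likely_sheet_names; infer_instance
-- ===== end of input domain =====

-- B replaces the stable reverse sort of (score, name) pairs with bucket ordering over the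
-- bounded score range 9..1 (same score, same fallback); not claimed faster.

-- ===== PORT A =====
def SUSPECT_SHEET_KEYWORDS : List String :=
  ["table 1", "top 100", "boys", "e&w", "england", "wales"]

def normalize_string (value : String) : String :=
  PySem.Str.strip (PySem.Str.join " " (PySem.Str.split₀ (PySem.Str.replace value "\n" " ")))

def likely_sheet_names (sheet_names : List String) : List String :=
  let scored : List (Int × String) :=
    sheet_names.foldl (fun scored name =>
      let norm := PySem.Str.lower (normalize_string name)
      let score : Int :=
        SUSPECT_SHEET_KEYWORDS.foldl
          (fun score kw => if PySem.Str.isIn kw norm then score + 1 else score) 0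
      let score :=
        if PySem.Str.strip (PySem.Str.lower name) ∈ (["table_1", "table 1", "table1"] : List String)
        then score + 3 else score
      scored ++ [(score, name)]) []
  let sortedScored := PySem.List.sorted scored (fun t => t.1) true
  let ordered := sortedScored.foldl (fun acc t => if t.1 > 0 then acc ++ [t.2] else acc) []
  if ordered = [] then sheet_names else ordered

-- ===== PORT B =====
def sheetScore (name : String) : Int :=
  let norm := PySem.Str.lower (normalize_string name)
  let score : Int := (SUSPECT_SHEET_KEYWORDS.countP (fun kw => PySem.Str.isIn kw norm) : Int)
  if PySem.Str.strip (PySem.Str.lower name) ∈ (["table_1", "table 1", "table1"] : List String)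
  then score + 3 else score

def likely_sheet_names_alt (sheet_names : List String) : List String :=
  let ordered :=
    (PySem.List.pyRange 9 0 (-1)).flatMap
      (fun s => sheet_names.filter (fun n => sheetScore n == s))
  if ordered = [] then sheet_names else ordered

-- ===== PRECONDITION & SPEC =====
def Spec_likely_sheet_names (sheet_names : List String) (out : List String) : Prop := out = likely_sheet_names_alt sheet_names
instance (sheet_names : List String) (out : List String) : Decidable (Spec_likely_sheet_names sheet_names out) := by unfold Spec_likely_sheet_names; infer_instance

-- ===== CLAIM (what is proved, stated in full; the proofs are below) =====
def Claim_equal_likely_sheet_names : Prop := ∀ (sheet_names : List String), Dom_likely_sheet_names sheet_names → Spec_likely_sheet_names sheet_names (likely_sheet_names sheet_names)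

-- ===== LEMMAS AND PROOFS =====

theorem scoreApair_eq (n : String) :
    ((if PySem.Str.strip (PySem.Str.lower n) ∈ (["table_1", "table 1", "table1"] : List String)
      then (SUSPECT_SHEET_KEYWORDS.foldl
              (fun score kw => if PySem.Str.isIn kw (PySem.Str.lower (normalize_string n)) = true
                               then score + 1 else score) (0 : Int)) + 3
      else SUSPECT_SHEET_KEYWORDS.foldl
              (fun score kw => if PySem.Str.isIn kw (PySem.Str.lower (normalize_string n)) = true
                               then score + 1 else score) (0 : Int)), n)
      = (sheetScore n, n) := by
  simp only [PySem.List.foldl_count_if, sheetScore, zero_add]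

-- sheetScore lies in [0, 9].
theorem sheetScore_bounds (name : String) : 0 ≤ sheetScore name ∧ sheetScore name ≤ 9 := by
  have h : SUSPECT_SHEET_KEYWORDS.countP
      (fun kw => PySem.Str.isIn kw (PySem.Str.lower (normalize_string name))) ≤ 6 := by
    have := List.countP_le_length
      (p := fun kw => PySem.Str.isIn kw (PySem.Str.lower (normalize_string name)))
      (l := SUSPECT_SHEET_KEYWORDS)
    simpa [SUSPECT_SHEET_KEYWORDS] using this
  simp only [sheetScore]
  split <;> omega

theorem mem_desc_of_bounds (s : Int) (h0 : 0 ≤ s) (h9 : s ≤ 9) :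
    s ∈ ([9, 8, 7, 6, 5, 4, 3, 2, 1, 0] : List Int) := by
  simp only [List.mem_cons]
  omega

-- insertBy skips a block it never goes before.
theorem insertBy_append_of_not_before {α : Type} (before : α → α → Bool) (x : α)
    (a b : List α) (h : ∀ y ∈ a, before x y = false) :
    PySem.List.insertBy before x (a ++ b) = a ++ PySem.List.insertBy before x b := by
  induction a with
  | nil => rfl
  | cons y ys ih =>
      simp [PySem.List.insertBy, h y (by simp), ih (fun z hz => h z (by simp [hz]))]

-- insertBy places x at the head when it goes before every element.
theorem insertBy_eq_cons_of_before {α : Type} (before : α → α → Bool) (x : α)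
    (b : List α) (h : ∀ y ∈ b, before x y = true) :
    PySem.List.insertBy before x b = x :: b := by
  cases b with
  | nil => rfl
  | cons y ys => simp [PySem.List.insertBy, h y (by simp)]

def buckets (ds : List Int) (l : List (Int × String)) : List (Int × String) :=
  ds.flatMap (fun s => l.filter (fun p => p.1 == s))

theorem mem_bucket_key {l : List (Int × String)} {s : Int} {p : Int × String}
    (h : p ∈ l.filter (fun p => p.1 == s)) : p.1 = s := by
  have := (List.mem_filter.mp h).2
  simpa using this

-- One stable-descending insertion step on a bucketed list appends into the right bucket.
theorem insertBy_buckets (ds : List Int) (hd : ds.Pairwise (· > ·))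
    (x : Int × String) (hx : x.1 ∈ ds) (l : List (Int × String)) :
    PySem.List.insertBy (fun a b => decide (b.1 < a.1)) x (buckets ds l)
      = buckets ds (l ++ [x]) := by
  induction ds with
  | nil => cases hx
  | cons s rest ih =>
      have hrest : rest.Pairwise (· > ·) := hd.tail
      have hgt : ∀ t ∈ rest, s > t := fun t ht => (List.pairwise_cons.mp hd).1 t ht
      simp only [buckets, List.flatMap_cons] at *
      by_cases hxs : x.1 = s
      · -- x belongs to the head bucket: goes after it, before everything deeper.
        rw [insertBy_append_of_not_before _ _ _ _
              (fun y hy => by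
                have hk := mem_bucket_key hy
                simp only [hk, hxs, decide_eq_false_iff_not]
                omega)]
        rw [insertBy_eq_cons_of_before _ _ _
              (fun y hy => by
                obtain ⟨t, ht, hyt⟩ := List.mem_flatMap.mp hy
                have hk := mem_bucket_key hyt
                have hst := hgt t ht
                simp only [hk, hxs, decide_eq_true_eq]
                omega)]
        have h1 : (l ++ [x]).filter (fun p => p.1 == s)
            = l.filter (fun p => p.1 == s) ++ [x] := by
          simp [List.filter_append, hxs]
        have h2 : rest.flatMap (fun t => (l ++ [x]).filter (fun p => p.1 == t))
            = rest.flatMap (fun t => l.filter (fun p => p.1 == t)) := by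
          refine List.flatMap_congr (fun t ht => ?_)
          have hst : s ≠ t := ne_of_gt (hgt t ht)
          simp [List.filter_append, hxs, hst]
        rw [h1, h2]
        simp
      · -- x belongs to a deeper bucket: skip the head bucket and recurse.
        have hxr : x.1 ∈ rest := by
          rcases List.mem_cons.mp hx with h | h
          · exact absurd h hxs
          · exact h
        have hlt : x.1 < s := hgt _ hxr
        rw [insertBy_append_of_not_before _ _ _ _
              (fun y hy => by
                have hk := mem_bucket_key hy
                simp only [hk, decide_eq_false_iff_not]
                omega)]
        rw [ih hrest hxr]
        have h2 : (l ++ [x]).filter (fun p => p.1 == s)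
            = l.filter (fun p => p.1 == s) := by
          simp [List.filter_append]
          omega
        rw [h2]

-- The whole stable reverse sort of a score-bounded pair list is the bucket concatenation.
theorem foldl_insertBy_buckets (xs l : List (Int × String))
    (hb : ∀ p ∈ xs, p.1 ∈ ([9, 8, 7, 6, 5, 4, 3, 2, 1, 0] : List Int)) :
    xs.foldl (fun acc x => PySem.List.insertBy (fun a b => decide (b.1 < a.1)) x acc)
        (buckets [9, 8, 7, 6, 5, 4, 3, 2, 1, 0] l)
      = buckets [9, 8, 7, 6, 5, 4, 3, 2, 1, 0] (l ++ xs) := by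
  induction xs generalizing l with
  | nil => simp
  | cons x t ih =>
      simp only [List.foldl_cons]
      rw [insertBy_buckets _ (by decide) x (hb x (by simp)) l]
      rw [ih (l ++ [x]) (fun p hp => hb p (by simp [hp]))]
      simp

theorem sorted_eq_buckets (xs : List (Int × String))
    (hb : ∀ p ∈ xs, p.1 ∈ ([9, 8, 7, 6, 5, 4, 3, 2, 1, 0] : List Int)) :
    PySem.List.sorted xs (fun t => t.1) true = buckets [9, 8, 7, 6, 5, 4, 3, 2, 1, 0] xs := by
  rw [PySem.List.sorted_rev_eq_foldl_insertBy]
  have := foldl_insertBy_buckets xs [] hb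
  simpa [buckets] using this

-- One bucket, restricted to positive scores and projected to names.
theorem bucket_pos (sheet_names : List String) (s : Int) (hs : 0 < s) :
    (((sheet_names.map (fun n => (sheetScore n, n))).filter
        (fun p => p.1 == s)).filter (fun t => decide (t.1 > 0))).map (fun t => t.2)
      = sheet_names.filter (fun n => sheetScore n == s) := by
  rw [List.filter_filter]
  have hp : ∀ p : Int × String, (decide (p.1 > 0) && (p.1 == s)) = (p.1 == s) := by
    intro p
    by_cases h : p.1 = s
    · simp [h]; omega
    · simp [h]
  rw [List.filter_congr (fun p _ => hp p), List.filter_map]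
  simp [Function.comp_def]

theorem bucket_zero (sheet_names : List String) :
    (((sheet_names.map (fun n => (sheetScore n, n))).filter
        (fun p => p.1 == (0 : Int))).filter (fun t => decide (t.1 > 0))).map (fun t => t.2)
      = [] := by
  rw [List.filter_filter]
  have h0 : (sheet_names.map (fun n => (sheetScore n, n))).filter
      (fun a => decide (a.1 > 0) && (a.1 == (0 : Int))) = [] :=
    List.filter_eq_nil_iff.mpr (fun p _ => by simp; omega)
  simp [h0]

set_option maxHeartbeats 1000000 in
theorem A_eq_B (sheet_names : List String) :
    likely_sheet_names sheet_names = likely_sheet_names_alt sheet_names := by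
  simp only [likely_sheet_names, likely_sheet_names_alt]
  rw [PySem.List.foldl_append_singleton_eq_map]
  simp only [List.nil_append]
  rw [List.map_congr_left (fun n (_ : n ∈ sheet_names) => scoreApair_eq n)]
  have hb : ∀ p ∈ sheet_names.map (fun n => (sheetScore n, n)),
      p.1 ∈ ([9, 8, 7, 6, 5, 4, 3, 2, 1, 0] : List Int) := by
    simp only [List.forall_mem_map]
    intro n _
    exact mem_desc_of_bounds _ (sheetScore_bounds n).1 (sheetScore_bounds n).2
  rw [sorted_eq_buckets _ hb]
  rw [PySem.List.foldl_append_ite (fun t : Int × String => t.1 > 0) (fun t => t.2)]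
  rw [show PySem.List.pyRange 9 0 (-1) = ([9, 8, 7, 6, 5, 4, 3, 2, 1] : List Int) from by decide]
  simp only [buckets, List.flatMap_cons, List.flatMap_nil, List.append_nil, List.nil_append,
    List.filter_append, List.map_append]
  rw [bucket_pos _ 9 (by norm_num), bucket_pos _ 8 (by norm_num), bucket_pos _ 7 (by norm_num),
      bucket_pos _ 6 (by norm_num), bucket_pos _ 5 (by norm_num), bucket_pos _ 4 (by norm_num),
      bucket_pos _ 3 (by norm_num), bucket_pos _ 2 (by norm_num), bucket_pos _ 1 (by norm_num),
      bucket_zero]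
  simp

-- ===== VERDICT (by name: the statement is the Claim_ definition above) =====
theorem likely_sheet_names_spec : Claim_equal_likely_sheet_names := by
  intro sheet_names _
  exact A_eq_B sheet_names
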